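-- pv_equiv track=rewrite | github.com/ToruOwO/BayesianLanguageEvolution-python | utils.py | make_all_data
-- ===== SOURCE A (Python) =====
-- patterns = ["00", "01", "11", "10"]
--
-- def make_all_xy():
-- 	res = []
-- 	for x in patterns:
-- 		for y in patterns:
-- 			res.append((x,y))
-- 	return res
--
-- def make_all_data(m):
-- 	"""
-- 	All size-m lists of (x,y) pairs
-- 	"""
-- 	all_xy = make_all_xy()
-- 	res = [[]]
-- 	for i in range(m):
-- 		temp = []
-- 		for r in res:
-- 			for xy in all_xy:
-- 				temp.append(r+[xy])
-- 		res = temp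
-- 	return res
-- ===== SOURCE B (Python) =====
-- patterns = ["00", "01", "11", "10"]
--
-- def make_all_xy():
--     return [(x, y) for x in patterns for y in patterns]
--
-- def make_all_data(m):
--     """All size-m lists of (x,y) pairs, built recursively over m."""
--     if m <= 0:
--         return [[]]
--     return [r + [xy] for r in make_all_data(m - 1) for xy in make_all_xy()]
-- ===== Notes on version B (the rewrite author's own statement) =====
-- stated objective: simpler
-- what changed: Replaces the explicit range(m) accumulator loop with temp lists by a recursion over m whose step is a single flat comprehension extending each prefix by one pair.
import Mathlib
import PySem

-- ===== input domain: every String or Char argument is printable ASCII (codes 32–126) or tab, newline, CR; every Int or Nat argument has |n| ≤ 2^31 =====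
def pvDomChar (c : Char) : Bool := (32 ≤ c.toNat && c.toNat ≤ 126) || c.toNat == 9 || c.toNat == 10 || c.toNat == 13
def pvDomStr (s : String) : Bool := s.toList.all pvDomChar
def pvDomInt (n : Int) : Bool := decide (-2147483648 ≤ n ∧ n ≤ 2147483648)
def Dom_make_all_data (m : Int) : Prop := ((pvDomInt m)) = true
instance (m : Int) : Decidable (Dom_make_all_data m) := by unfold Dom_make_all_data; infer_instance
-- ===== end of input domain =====

-- B: recursion over m with one flat comprehension per step, instead of A's range(m) loop
-- rebuilding an explicit temp accumulator; same output list (return-value equivalence).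

-- ===== PORT A =====
def pv_patterns : List String := ["00", "01", "11", "10"]

def make_all_xy : List (String × String) :=
  pv_patterns.foldl (fun res x =>
    pv_patterns.foldl (fun res y => res ++ [(x, y)]) res) []

def make_all_data (m : Int) : List (List (String × String)) :=
  (PySem.List.pyRange 0 m 1).foldl (fun res _i =>
    res.foldl (fun temp r =>
      make_all_xy.foldl (fun temp xy => temp ++ [r ++ [xy]]) temp) []) [[]]

-- ===== PORT B =====
def make_all_xy_alt : List (String × String) :=
  pv_patterns.flatMap (fun x => pv_patterns.map (fun y => (x, y)))

def make_all_data_alt (m : Int) : List (List (String × String)) :=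
  if m ≤ 0 then [[]]
  else (make_all_data_alt (m - 1)).flatMap (fun r =>
    make_all_xy_alt.map (fun xy => r ++ [xy]))
termination_by m.toNat
decreasing_by omega

-- ===== PRECONDITION & SPEC =====
def Spec_make_all_data (m : Int) (out : List (List (String × String))) : Prop := out = make_all_data_alt m
instance (m : Int) (out : List (List (String × String))) : Decidable (Spec_make_all_data m out) := by unfold Spec_make_all_data; infer_instance

-- ===== CLAIM (what is proved, stated in full; the proofs are below) =====
def Claim_equal_make_all_data : Prop := ∀ (m : Int), Dom_make_all_data m → Spec_make_all_data m (make_all_data m)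

-- ===== LEMMAS AND PROOFS =====

theorem pv_foldl_snoc {α β : Type} (l : List α) (f : α → β) (acc : List β) :
    l.foldl (fun t x => t ++ [f x]) acc = acc ++ l.map f := by
  induction l generalizing acc with
  | nil => simp
  | cons x xs ih => simp [List.foldl_cons, ih]

theorem pv_xy_eq : make_all_xy = make_all_xy_alt := by decide

-- one iteration of A's loop body equals B's flat comprehension step
theorem pv_step_eq (res : List (List (String × String))) :
    res.foldl (fun temp r =>
      make_all_xy.foldl (fun temp xy => temp ++ [r ++ [xy]]) temp) []
    = res.flatMap (fun r => make_all_xy_alt.map (fun xy => r ++ [xy])) := by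
  have h : ∀ (r : List (String × String)) (temp : List (List (String × String))),
      make_all_xy.foldl (fun temp xy => temp ++ [r ++ [xy]]) temp
      = temp ++ make_all_xy_alt.map (fun xy => r ++ [xy]) := by
    intro r temp
    rw [pv_foldl_snoc, pv_xy_eq]
  calc res.foldl (fun temp r =>
        make_all_xy.foldl (fun temp xy => temp ++ [r ++ [xy]]) temp) []
      = res.foldl (fun temp r => temp ++ make_all_xy_alt.map (fun xy => r ++ [xy])) [] := by
        apply PySem.List.foldl_congr_mem; intro temp r _; exact h r temp
    _ = res.flatMap (fun r => make_all_xy_alt.map (fun xy => r ++ [xy])) := by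
        rw [PySem.List.foldl_append_eq_flatMap]; simp

theorem pv_A_zero (m : Int) (hm : m ≤ 0) : make_all_data m = [[]] := by
  unfold make_all_data
  rw [PySem.List.pyRange_one_eq_nil hm]
  rfl

theorem pv_A_succ (m : Int) (hm : 0 < m) :
    make_all_data m
    = (make_all_data (m - 1)).flatMap (fun r =>
        make_all_xy_alt.map (fun xy => r ++ [xy])) := by
  unfold make_all_data
  have : PySem.List.pyRange 0 m 1 = PySem.List.pyRange 0 (m - 1) 1 ++ [m - 1] := by
    have := PySem.List.pyRange_one_succ_right (a := 0) (b := m - 1) (by omega)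
    simpa using this
  rw [this, List.foldl_append]
  simp only [List.foldl_cons, List.foldl_nil]
  rw [pv_step_eq]

theorem pv_main (n : Nat) : ∀ (m : Int), m.toNat = n → make_all_data m = make_all_data_alt m := by
  induction n with
  | zero =>
    intro m hm
    have hle : m ≤ 0 := by omega
    rw [pv_A_zero m hle, make_all_data_alt]
    simp [hle]
  | succ k ih =>
    intro m hm
    have hpos : 0 < m := by omega
    rw [pv_A_succ m hpos, make_all_data_alt]
    have : ¬ m ≤ 0 := by omega
    simp only [this, if_false]
    rw [ih (m - 1) (by omega)]

-- ===== VERDICT (by name: the statement is the Claim_ definition above) =====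
theorem make_all_data_spec : Claim_equal_make_all_data := by
  intro m _
  unfold Spec_make_all_data
  exact pv_main m.toNat m rfl
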